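-- pv_equiv track=rewrite | github.com/rpasco787/Handwriting-Recognition-Project | segmenter.py | median_sequences
-- ===== SOURCE A (Python) =====
-- import math
--
-- def median_sequences(arr):
--     result = []
--     start = 0
--     end = 0
--     for x in range(len(arr) - 1):
--         if (arr[x+1] - arr[x] != 1):
--             end = x
--             count = 0
--
--             result.append(math.floor((arr[start]+arr[end])/2))
--             start = x+1
--
--     end = len(arr)-1
--     result.append(math.floor((arr[start]+arr[end])/2))
--
--     return result
-- ===== SOURCE B (Python) =====
-- def median_sequences(arr):
--     n = len(arr)
--     starts = [0] + [i for i in range(1, n) if arr[i] - arr[i - 1] != 1]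
--     ends = [s - 1 for s in starts[1:]] + [n - 1]
--     return [arr[(s + e) // 2] for s, e in zip(starts, ends)]
-- ===== Notes on version B (the rewrite author's own statement) =====
-- stated objective: alternative
-- what changed: B never averages values: it builds the list of run-start indices with a filtering comprehension, derives the matching end indices, and returns the array ELEMENT at the median index arr[(s+e)//2] of each run, using that within a run values rise by exactly 1 so the value-average equals the middle element; A instead emits floor((arr[start]+arr[end])/2) inline in a single scan with start/end bookkeeping.
import Mathlib
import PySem

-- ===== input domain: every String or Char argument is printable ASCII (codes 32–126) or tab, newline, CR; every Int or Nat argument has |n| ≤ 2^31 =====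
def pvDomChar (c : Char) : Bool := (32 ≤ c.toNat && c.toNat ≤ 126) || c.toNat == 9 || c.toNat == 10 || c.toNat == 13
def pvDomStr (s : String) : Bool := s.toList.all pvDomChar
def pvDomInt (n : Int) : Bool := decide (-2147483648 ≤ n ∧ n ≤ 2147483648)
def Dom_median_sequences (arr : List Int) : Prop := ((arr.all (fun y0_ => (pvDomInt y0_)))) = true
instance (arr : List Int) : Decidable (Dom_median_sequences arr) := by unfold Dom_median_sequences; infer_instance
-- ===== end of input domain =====

-- B replaces A's inline value-average scan by index arithmetic: it lists the run-start
-- indices, pairs each with its run-end index, and returns the array ELEMENT at the median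
-- index of each run (within a run values rise by exactly 1, so that element is the floored
-- value-average). Same O(n) cost — an alternative algorithm, not a speed claim.
-- On Dom (|n| ≤ 2^31) A's math.floor((a+b)/2) over float is exact integer floor division.

-- ===== PORT A =====
-- loop body of A (state: result list and the `start` index; `end`/`count` are overwritten before use)
def pvFA (arr : List Int) (st : List Int × Nat) (x : Nat) : List Int × Nat :=
  if arr.getD (x+1) 0 - arr.getD x 0 ≠ 1 then
    (st.1 ++ [PySem.Int.floordiv (arr.getD st.2 0 + arr.getD x 0) 2], x+1)
  else st

def median_sequences (arr : List Int) : List Int :=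
  let s := (List.range (arr.length - 1)).foldl (pvFA arr) ([], 0)
  s.1 ++ [PySem.Int.floordiv (arr.getD s.2 0 + arr.getD (arr.length - 1) 0) 2]

-- ===== PORT B =====
-- the comprehension's filter condition: arr[i] - arr[i-1] != 1
def pvPb (arr : List Int) (i : Nat) : Bool := decide (arr.getD i 0 - arr.getD (i-1) 0 ≠ 1)

def median_sequences_alt (arr : List Int) : List Int :=
  let n := arr.length
  let starts : List Nat := 0 :: (List.range' 1 (n - 1)).filter (pvPb arr)
  let ends : List Nat := starts.tail.map (fun s => s - 1) ++ [n - 1]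
  (starts.zip ends).map (fun p => arr.getD ((p.1 + p.2) / 2) 0)

-- ===== PRECONDITION & SPEC =====
-- Pre_ excludes only the empty list, on which the Python A raises IndexError (arr[start] with start=0).
def Pre_median_sequences (arr : List Int) : Prop := arr ≠ []
instance (arr : List Int) : Decidable (Pre_median_sequences arr) := by unfold Pre_median_sequences; infer_instance
def pvWitness_median_sequences : List Int := ([1, 2, 5])

def Spec_median_sequences (arr : List Int) (out : List Int) : Prop := out = median_sequences_alt arr
instance (arr : List Int) (out : List Int) : Decidable (Spec_median_sequences arr out) := by unfold Spec_median_sequences; infer_instance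

-- ===== CLAIM (what is proved, stated in full; the proofs are below) =====
def Claim_equal_median_sequences : Prop := ∀ (arr : List Int), Dom_median_sequences arr → Pre_median_sequences arr → Spec_median_sequences arr (median_sequences arr)

-- ===== LEMMAS AND PROOFS =====

-- the midpoints of the finished runs, read off the run-start list
def pvMids (arr : List Int) : List Nat → List Int
  | s :: s' :: rest => arr.getD ((s + (s' - 1)) / 2) 0 :: pvMids arr (s' :: rest)
  | _ => []

-- B's whole output as a recursion over the run-start list (final run ends at index e)
def pvBout (arr : List Int) (e : Nat) : List Nat → List Int
  | s :: s' :: rest => arr.getD ((s + (s' - 1)) / 2) 0 :: pvBout arr e (s' :: rest)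
  | [s] => [arr.getD ((s + e) / 2) 0]
  | [] => []

theorem pv_zip_bout (arr : List Int) (e : Nat) :
    ∀ L : List Nat,
      ((L.zip (L.tail.map (fun s => s - 1) ++ [e])).map
        (fun p => arr.getD ((p.1 + p.2) / 2) 0)) = pvBout arr e L := by
  intro L
  induction L with
  | nil => simp [pvBout]
  | cons s rest ih =>
    cases rest with
    | nil => simp [pvBout]
    | cons s' r' =>
      simp only [List.tail_cons, List.map_cons, List.cons_append, List.zip_cons_cons,
        List.map_cons, pvBout]
      exact congrArg _ ih

theorem pv_bout_eq (arr : List Int) (e : Nat) :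
    ∀ (L : List Nat) (s : Nat),
      pvBout arr e (L ++ [s]) = pvMids arr (L ++ [s]) ++ [arr.getD ((s + e) / 2) 0] := by
  intro L
  induction L with
  | nil => intro s; simp [pvBout, pvMids]
  | cons t L ih =>
    intro s
    cases L with
    | nil => simp [pvBout, pvMids]
    | cons u L' =>
      have h1 : pvBout arr e ((t :: u :: L') ++ [s]) =
          arr.getD ((t + (u - 1)) / 2) 0 :: pvBout arr e ((u :: L') ++ [s]) := rfl
      have h2 : pvMids arr ((t :: u :: L') ++ [s]) =
          arr.getD ((t + (u - 1)) / 2) 0 :: pvMids arr ((u :: L') ++ [s]) := rfl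
      rw [h1, h2, ih s]; simp

theorem pv_mids_snoc (arr : List Int) :
    ∀ (L : List Nat) (s t : Nat),
      pvMids arr (L ++ [s, t]) = pvMids arr (L ++ [s]) ++ [arr.getD ((s + (t - 1)) / 2) 0] := by
  intro L
  induction L with
  | nil => intro s t; simp [pvMids]
  | cons u L ih =>
    intro s t
    cases L with
    | nil => simp [pvMids]
    | cons v L' =>
      have h1 : pvMids arr ((u :: v :: L') ++ [s, t]) =
          arr.getD ((u + (v - 1)) / 2) 0 :: pvMids arr ((v :: L') ++ [s, t]) := rfl
      have h2 : pvMids arr ((u :: v :: L') ++ [s]) =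
          arr.getD ((u + (v - 1)) / 2) 0 :: pvMids arr ((v :: L') ++ [s]) := rfl
      rw [h1, h2, ih s t]; simp

-- within a run (no break in (s, s+t]) the values rise by exactly 1
theorem pv_run (arr : List Int) (s : Nat) :
    ∀ t : Nat, (∀ i, s < i → i ≤ s + t → arr.getD i 0 - arr.getD (i-1) 0 = 1) →
      arr.getD (s + t) 0 = arr.getD s 0 + t := by
  intro t
  induction t with
  | zero => intro _; simp
  | succ t ih =>
    intro h
    have h1 := h (s + t + 1) (by omega) (by omega)
    have h2 := ih (fun i hi hi' => h i hi (by omega))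
    simp only [show s + t + 1 - 1 = s + t from rfl] at h1
    have : arr.getD (s + (t+1)) 0 = arr.getD (s + t) 0 + 1 := by
      have : s + (t + 1) = s + t + 1 := by omega
      rw [this]; omega
    rw [this, h2]; push_cast; ring

-- the floored value-average of a run equals the element at the run's median index
theorem pv_mid (arr : List Int) (s e : Nat) (hse : s ≤ e)
    (h : ∀ i, s < i → i ≤ e → arr.getD i 0 - arr.getD (i-1) 0 = 1) :
    PySem.Int.floordiv (arr.getD s 0 + arr.getD e 0) 2 = arr.getD ((s + e) / 2) 0 := by
  have he : arr.getD e 0 = arr.getD s 0 + (e - s : Nat) := by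
    have := pv_run arr s (e - s) (fun i hi hi' => h i hi (by omega))
    rwa [show s + (e - s) = e from by omega] at this
  have hm : arr.getD ((s + e) / 2) 0 = arr.getD s 0 + ((e - s) / 2 : Nat) := by
    have := pv_run arr s ((e - s) / 2) (fun i hi hi' => h i hi (by omega))
    rwa [show s + (e - s) / 2 = (s + e) / 2 from by omega] at this
  rw [PySem.Int.floordiv_eq_ediv_of_pos (by omega), he, hm]
  omega

-- loop invariant: after m steps A's state is (midpoints of the finished runs, last run start),
-- the run-start list so far is L ++ [s], and no break lies in (s, m]
theorem pv_inv (arr : List Int) :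
    ∀ m : Nat, ∃ (L : List Nat) (s : Nat),
      0 :: (List.range' 1 m).filter (pvPb arr) = L ++ [s] ∧
      (List.range m).foldl (pvFA arr) ([], 0) = (pvMids arr (L ++ [s]), s) ∧
      s ≤ m ∧
      (∀ i, s < i → i ≤ m → arr.getD i 0 - arr.getD (i-1) 0 = 1) := by
  intro m
  induction m with
  | zero =>
    exact ⟨[], 0, by simp, by simp [pvMids], le_refl 0, by omega⟩
  | succ m ih =>
    obtain ⟨L, s, hS, hF, hsm, hrun⟩ := ih
    rw [List.range_succ, List.foldl_append, List.foldl_cons, List.foldl_nil, hF]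
    have hr' : List.range' 1 (m+1) = List.range' 1 m ++ [m + 1] := by
      have := List.range'_concat (s := 1) (n := m) (step := 1)
      simpa [Nat.add_comm] using this
    by_cases hc : arr.getD (m+1) 0 - arr.getD m 0 = 1
    · -- consecutive: state unchanged, no new start
      have hPb : pvPb arr (m + 1) = false := by
        simp only [pvPb, decide_eq_false_iff_not, not_not]
        simpa using hc
      refine ⟨L, s, ?_, ?_, by omega, ?_⟩
      · rw [hr', List.filter_append, (by simp [hPb] : List.filter (pvPb arr) [m+1] = []),
          List.append_nil, hS]
      · unfold pvFA
        rw [if_neg (not_not_intro hc)]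
      · intro i hi hi'
        by_cases him : i ≤ m
        · exact hrun i hi him
        · have : i = m + 1 := by omega
          subst this; simpa using hc
    · -- break: A emits the midpoint, the start list gains m+1
      have hPb : pvPb arr (m + 1) = true := by
        simp only [pvPb, decide_eq_true_eq]
        simpa using hc
      refine ⟨L ++ [s], m + 1, ?_, ?_, le_refl _, by omega⟩
      · rw [hr', List.filter_append, (by simp [hPb] : List.filter (pvPb arr) [m+1] = [m+1]),
          ← List.cons_append, hS, List.append_assoc]
      · unfold pvFA
        rw [if_pos hc]
        simp only [List.append_assoc, List.cons_append, List.nil_append]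
        rw [pv_mids_snoc arr L s (m+1)]
        have hmid := pv_mid arr s m hsm hrun
        simp only [Nat.add_sub_cancel]
        rw [hmid]

-- ===== VERDICT (by name: the statement is the Claim_ definition above) =====
theorem median_sequences_spec : Claim_equal_median_sequences := by
  intro arr _ hne
  show median_sequences arr = median_sequences_alt arr
  unfold median_sequences median_sequences_alt
  obtain ⟨L, s, hS, hF, hsm, hrun⟩ := pv_inv arr (arr.length - 1)
  rw [hF]
  simp only
  rw [pv_zip_bout arr (arr.length - 1) _ , hS, pv_bout_eq]
  have hmid := pv_mid arr s (arr.length - 1) hsm hrun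
  rw [hmid]
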